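-- pv_equiv track=rewrite | github.com/msr-ds3/subway-flow | a_names_script_v2.py | samewords
-- ===== SOURCE A (Python) =====
-- def samewords(name1, name2): #Checks if two phrases consist of the same words.
--     set1 = set()
--     set2 = set()
--     arr1 = name1.split()
--     arr2 = name2.split()
--     for v in arr1:
--         set1.add(v)
--     for x in arr2:
--         set2.add(x)
--     if set1 == set2:
--         return -2
--     else:
--         return 0
-- ===== SOURCE B (Python) =====
-- def samewords(name1, name2):
--     def canon(name):
--         words = sorted(name.split())
--         out = []
--         for w in reversed(words):
--             if not out or out[0] != w:
--                 out.insert(0, w)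
--         return out
--     return -2 if canon(name1) == canon(name2) else 0
-- ===== Notes on version B (the rewrite author's own statement) =====
-- stated objective: alternative
-- what changed: B builds no sets: it canonicalises each phrase by sorting its word list and dropping adjacent duplicates in one backward scan, then compares the two canonical sorted lists; A hashes words into two sets and compares them.
import Mathlib
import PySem

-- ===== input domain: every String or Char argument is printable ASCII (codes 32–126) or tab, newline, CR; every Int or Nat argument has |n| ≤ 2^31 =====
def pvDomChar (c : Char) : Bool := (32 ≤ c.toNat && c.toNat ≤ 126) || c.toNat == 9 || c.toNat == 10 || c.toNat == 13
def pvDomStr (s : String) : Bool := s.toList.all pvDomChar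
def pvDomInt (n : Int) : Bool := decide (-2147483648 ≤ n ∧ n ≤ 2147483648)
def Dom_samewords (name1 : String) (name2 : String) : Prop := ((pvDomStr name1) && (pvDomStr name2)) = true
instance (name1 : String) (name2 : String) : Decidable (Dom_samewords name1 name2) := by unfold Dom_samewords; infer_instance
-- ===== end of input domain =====

-- B replaces A's set-hashing (two sets built, one set-equality compare) by sort-then-scan:
-- each phrase is canonicalised as its sorted word list with adjacent duplicates dropped in
-- one backward scan, and the two canonical lists are compared; same return value (-2 / 0).

-- ===== PORT A =====
def samewords (name1 : String) (name2 : String) : Int :=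
  let set1 : PySem.Set String := PySem.Set.empty
  let set2 : PySem.Set String := PySem.Set.empty
  let arr1 := PySem.Str.split₀ name1
  let arr2 := PySem.Str.split₀ name2
  let set1 := arr1.foldl PySem.Set.add set1
  let set2 := arr2.foldl PySem.Set.add set2
  if PySem.Set.equal set1 set2 then -2 else 0

-- ===== PORT B =====
-- backward scan 'for w in reversed(words): if not out or out[0] != w: out.insert(0, w)' = foldr
def pvCanon (name : String) : List String :=
  let words := PySem.List.sorted (PySem.Str.split₀ name) (fun w => w) false
  words.foldr (fun w out =>
    match out with
    | [] => w :: out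
    | x :: _ => if x ≠ w then w :: out else out) []

def samewords_alt (name1 : String) (name2 : String) : Int :=
  if pvCanon name1 = pvCanon name2 then -2 else 0

-- ===== PRECONDITION & SPEC =====
def Spec_samewords (name1 : String) (name2 : String) (out : Int) : Prop := out = samewords_alt name1 name2
instance (name1 : String) (name2 : String) (out : Int) : Decidable (Spec_samewords name1 name2 out) := by unfold Spec_samewords; infer_instance

-- ===== CLAIM (what is proved, stated in full; the proofs are below) =====
def Claim_equal_samewords : Prop := ∀ (name1 : String) (name2 : String), Dom_samewords name1 name2 → Spec_samewords name1 name2 (samewords name1 name2)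

-- ===== LEMMAS AND PROOFS =====

-- the adjacent-dedup step of pvCanon's backward scan, named for the lemmas below
def pvStep (w : String) (out : List String) : List String :=
  match out with
  | [] => w :: out
  | x :: _ => if x ≠ w then w :: out else out

theorem pvCanon_eq_foldr (name : String) :
    pvCanon name = (PySem.List.sorted (PySem.Str.split₀ name) (fun w => w) false).foldr pvStep [] := rfl

theorem mem_foldr_pvStep (l : List String) (y : String) : y ∈ l.foldr pvStep [] ↔ y ∈ l := by
  induction l with
  | nil => simp
  | cons w t ih =>
    simp only [List.foldr_cons, List.mem_cons, ← ih]
    cases h : t.foldr pvStep [] with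
    | nil => simp [pvStep]
    | cons x r =>
      by_cases hx : x = w
      · subst hx
        simp only [pvStep, ne_eq, not_true_eq_false, if_false]
        constructor
        · intro hy; exact Or.inr hy
        · rintro (rfl | hy)
          · exact List.mem_cons_self
          · exact hy
      · simp [pvStep, hx]

theorem pairwise_lt_foldr_pvStep (l : List String) (hl : l.Pairwise (· ≤ ·)) :
    (l.foldr pvStep []).Pairwise (· < ·) := by
  induction l with
  | nil => simp
  | cons w t ih =>
    rcases List.pairwise_cons.mp hl with ⟨hw, ht⟩
    have ihr := ih ht
    cases h : t.foldr pvStep [] with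
    | nil => simp [pvStep, h]
    | cons x r =>
      rw [h] at ihr
      by_cases hx : x = w
      · subst hx; simpa [pvStep, h] using ihr
      · have hxmem : x ∈ t := (mem_foldr_pvStep t x).mp (by rw [h]; exact List.mem_cons_self)
        have hwx : w < x := lt_of_le_of_ne (hw x hxmem) (fun e => hx e.symm)
        simp only [List.foldr_cons, pvStep, h, ne_eq, hx, not_false_eq_true, if_true]
        refine List.pairwise_cons.mpr ⟨?_, ihr⟩
        intro y hy
        rcases List.mem_cons.mp hy with rfl | hyr
        · exact hwx
        · exact lt_trans hwx (List.rel_of_pairwise_cons ihr hyr)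

-- pvCanon names exactly sorted(set(words)): the canonical form of the word set
theorem pvCanon_eq_sorted_ofList (name : String) :
    pvCanon name = PySem.List.sorted (PySem.Set.ofList (PySem.Str.split₀ name)) (fun w => w) false := by
  rw [pvCanon_eq_foldr]
  set ws := PySem.Str.split₀ name with hws
  set c := (PySem.List.sorted ws (fun w => w) false).foldr pvStep [] with hc
  have hpl : c.Pairwise (· < ·) :=
    pairwise_lt_foldr_pvStep _ (PySem.List.sorted_pairwise ws (fun w => w))
  have hmem : ∀ y, y ∈ c ↔ y ∈ PySem.Set.ofList ws := by
    intro y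
    rw [hc, mem_foldr_pvStep, PySem.List.mem_sorted, PySem.Set.mem_ofList]
  have hperm : c.Perm (PySem.Set.ofList ws) :=
    (List.perm_ext_iff_of_nodup hpl.nodup (PySem.Set.nodup_ofList ws)).mpr hmem
  exact (PySem.List.sorted_eq_of_perm_of_pairwise_lt _ _ _ hperm hpl).symm

theorem set_equal_iff_canon_eq (name1 name2 : String) :
    PySem.Set.equal (PySem.Set.ofList (PySem.Str.split₀ name1)) (PySem.Set.ofList (PySem.Str.split₀ name2)) = true
      ↔ pvCanon name1 = pvCanon name2 := by
  rw [PySem.Set.equal_iff, pvCanon_eq_sorted_ofList, pvCanon_eq_sorted_ofList,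
    PySem.List.sorted_id_eq_sorted_id_iff_perm,
    List.perm_ext_iff_of_nodup (PySem.Set.nodup_ofList _) (PySem.Set.nodup_ofList _)]

-- ===== VERDICT (by name: the statement is the Claim_ definition above) =====
theorem samewords_spec : Claim_equal_samewords := by
  intro name1 name2 _
  unfold Spec_samewords samewords samewords_alt
  simp only [PySem.Set.empty, ← PySem.Set.ofList_eq_foldl]
  by_cases h : pvCanon name1 = pvCanon name2
  · rw [if_pos ((set_equal_iff_canon_eq name1 name2).mpr h), if_pos h]
  · rw [if_neg (fun he => h ((set_equal_iff_canon_eq name1 name2).mp he)), if_neg h]
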